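-- pv_equiv track=rewrite | github.com/Stewart-Y/ABVTrends | backend/app/scrapers/tier2/reservebar.py | _extract_brand_from_name
-- ===== SOURCE A (Python) =====
-- from typing import Any, Optional
--
-- def _extract_brand_from_name(name: str) -> Optional[str]:
--     """Extract brand from product name."""
--     # ReserveBar often has format: "Brand Name - Product Details"
--     if " - " in name:
--         return name.split(" - ")[0].strip()
--
--     # Take first 2-3 words if capitalized
--     words = name.split()
--     brand_words = []
--
--     for word in words[:3]:
--         # Skip common product type words
--         skip_words = [
--             "whiskey", "bourbon", "scotch", "vodka", "gin", "rum",
--             "tequila", "mezcal", "cognac", "brandy", "750ml", "1l"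
--         ]
--         if word.lower() in skip_words:
--             break
--         if word[0].isupper():
--             brand_words.append(word)
--
--     if brand_words:
--         return " ".join(brand_words)
--     return None
-- ===== SOURCE B (Python) =====
-- from typing import Any, Optional
--
-- SKIP_WORDS = {
--     "whiskey", "bourbon", "scotch", "vodka", "gin", "rum",
--     "tequila", "mezcal", "cognac", "brandy", "750ml", "1l",
-- }
--
-- def _brand(words, k):
--     """Recursively build the brand string from at most k leading words.
--
--     Returns the joined capitalized words before the first product-type word,
--     or None if there are none. No list accumulator, no join: the result
--     string is assembled bottom-up from the recursion on the tail."""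
--     if k == 0 or not words:
--         return None
--     w = words[0]
--     if w.lower() in SKIP_WORDS:
--         return None
--     rest = _brand(words[1:], k - 1)
--     if not w[0].isupper():
--         return rest
--     return w if rest is None else w + " " + rest
--
-- def _extract_brand_from_name(name: str) -> Optional[str]:
--     """Extract brand from product name."""
--     if " - " in name:
--         return name.split(" - ")[0].strip()
--     return _brand(name.split(), 3)
-- ===== Notes on version B (the rewrite author's own statement) =====
-- stated objective: alternative
-- what changed: A's imperative break/append loop plus final join is replaced by a bounded recursion over the word list that assembles the Optional brand string directly bottom-up (no accumulator list, no join).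
import Mathlib
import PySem

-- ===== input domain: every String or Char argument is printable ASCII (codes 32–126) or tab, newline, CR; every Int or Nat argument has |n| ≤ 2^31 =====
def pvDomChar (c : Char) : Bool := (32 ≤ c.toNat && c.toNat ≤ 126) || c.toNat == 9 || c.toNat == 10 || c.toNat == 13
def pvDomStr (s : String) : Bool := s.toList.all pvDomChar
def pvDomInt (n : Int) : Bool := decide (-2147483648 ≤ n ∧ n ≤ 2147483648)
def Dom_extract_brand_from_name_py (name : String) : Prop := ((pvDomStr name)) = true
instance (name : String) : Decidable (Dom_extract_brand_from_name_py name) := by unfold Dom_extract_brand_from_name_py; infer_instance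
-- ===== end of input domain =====

-- B replaces A's break/append loop and final join by a bounded recursion over the word
-- list that assembles the Optional brand string directly bottom-up; objective: alternative.

-- ===== PORT A =====
def pvSkipWords : List String :=
  ["whiskey", "bourbon", "scotch", "vodka", "gin", "rum",
   "tequila", "mezcal", "cognac", "brandy", "750ml", "1l"]

-- A's for-loop with break: recursion over the words, accumulator for brand_words
def pvLoopA (acc : List String) : List String → List String
  | [] => acc
  | w :: rest =>
    if pvSkipWords.contains (PySem.Str.lower w) then acc
    else if PySem.Chars.isupper (w.toList.headD ' ') then pvLoopA (acc ++ [w]) rest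
    else pvLoopA acc rest

def extract_brand_from_name_py (name : String) : Option String :=
  if PySem.Str.isIn " - " name then
    -- name.split(" - ")[0].strip(): the separator is non-empty, so split? is some and non-empty
    some (PySem.Str.strip (((PySem.Str.split? name " - ").getD []).headD ""))
  else
    let words := PySem.Str.split₀ name
    let brand_words := pvLoopA [] (words.take 3)
    if brand_words ≠ [] then some (PySem.Str.join " " brand_words) else none

-- ===== PORT B =====
-- B's module-level SKIP_WORDS set
def pvSkipSet : PySem.Set String := PySem.Set.ofList pvSkipWords

-- B's recursive _brand(words, k): builds the Optional brand string bottom-up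
def pvBrandB : List String → Nat → Option String
  | _, 0 => none
  | [], _ + 1 => none
  | w :: ws, k + 1 =>
    if pvSkipSet.contains (PySem.Str.lower w) then none
    else
      let rest := pvBrandB ws k
      if !(PySem.Chars.isupper (w.toList.headD ' ')) then rest
      else match rest with
           | none => some w
           | some s => some (w ++ " " ++ s)

def extract_brand_from_name_py_alt (name : String) : Option String :=
  if PySem.Str.isIn " - " name then
    some (PySem.Str.strip (((PySem.Str.split? name " - ").getD []).headD ""))
  else
    pvBrandB (PySem.Str.split₀ name) 3

-- ===== PRECONDITION & SPEC =====
def Spec_extract_brand_from_name_py (name : String) (out : Option String) : Prop := out = extract_brand_from_name_py_alt name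
instance (name : String) (out : Option String) : Decidable (Spec_extract_brand_from_name_py name out) := by unfold Spec_extract_brand_from_name_py; infer_instance

-- ===== CLAIM (what is proved, stated in full; the proofs are below) =====
def Claim_equal_extract_brand_from_name_py : Prop := ∀ (name : String), Dom_extract_brand_from_name_py name → Spec_extract_brand_from_name_py name (extract_brand_from_name_py name)

-- ===== LEMMAS AND PROOFS =====

-- Set membership agrees with list membership for the skip words
lemma pv_skipset_mem (s : String) : s ∈ pvSkipSet ↔ s ∈ pvSkipWords :=
  PySem.Set.mem_ofList _ _

lemma pv_skipset_contains_eq (s : String) :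
    pvSkipSet.contains s = pvSkipWords.contains s := by
  cases h : pvSkipWords.contains s
  · rw [Bool.eq_false_iff]
    intro hc
    have hm := (pv_skipset_mem s).1 ((PySem.Set.contains_iff _ _).1 hc)
    simp [List.contains_eq_mem] at h
    exact h hm
  · have : s ∈ pvSkipWords := by simpa [List.contains_eq_mem] using h
    exact (PySem.Set.contains_iff _ _).2 ((pv_skipset_mem s).2 this)

-- A's loop only appends to its accumulator
lemma pv_loopA_acc (ws : List String) : ∀ acc : List String,
    pvLoopA acc ws = acc ++ pvLoopA [] ws := by
  induction ws with
  | nil => intro acc; simp [pvLoopA]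
  | cons w rest ih =>
    intro acc
    cases h : pvSkipWords.contains (PySem.Str.lower w) with
    | true => simp only [pvLoopA, h, if_true, List.append_nil]
    | false =>
      cases hu : PySem.Chars.isupper (w.toList.headD ' ') with
      | true =>
        simp only [pvLoopA, h, Bool.false_eq_true, if_false, hu, if_true, List.nil_append]
        rw [ih (acc ++ [w]), ih [w], List.append_assoc]
      | false =>
        simp only [pvLoopA, h, Bool.false_eq_true, if_false, hu]
        exact ih acc

-- " ".join([w]) = w
lemma pv_join_singleton (w : String) : PySem.Str.join " " [w] = w := by
  apply String.toList_inj.mp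
  simp [PySem.Str.toList_join, PySem.Chars.join_singleton]

-- " ".join(w :: l) = w + " " + " ".join(l) for non-empty l
lemma pv_join_cons (w a : String) (t : List String) :
    PySem.Str.join " " (w :: a :: t) = w ++ " " ++ PySem.Str.join " " (a :: t) := by
  apply String.toList_inj.mp
  simp [PySem.Str.toList_join, PySem.Chars.join_cons_cons]

-- B's recursion computes A's loop-then-join on the first k words
lemma pv_brandB_eq (ws : List String) : ∀ k : Nat,
    pvBrandB ws k =
      (if pvLoopA [] (ws.take k) = [] then none
       else some (PySem.Str.join " " (pvLoopA [] (ws.take k)))) := by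
  induction ws with
  | nil => intro k; cases k <;> simp [pvBrandB, pvLoopA]
  | cons w rest ih =>
    intro k
    cases k with
    | zero => simp [pvBrandB, pvLoopA]
    | succ k =>
      simp only [List.take_succ_cons]
      cases h : pvSkipWords.contains (PySem.Str.lower w) with
      | true =>
        simp only [pvBrandB, pv_skipset_contains_eq, h, if_true, pvLoopA]
      | false =>
        cases hu : PySem.Chars.isupper (w.toList.headD ' ') with
        | true =>
          simp only [pvBrandB, pv_skipset_contains_eq, h, Bool.false_eq_true, if_false, hu,
            Bool.not_true, pvLoopA, ih k]
          rw [List.nil_append, pv_loopA_acc (rest.take k) [w]]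
          cases hL : pvLoopA [] (rest.take k) with
          | nil => simp [pv_join_singleton]
          | cons a t => simp [pv_join_cons]
        | false =>
          simp only [pvBrandB, pv_skipset_contains_eq, h, Bool.false_eq_true, if_false, hu,
            Bool.not_false, if_true, pvLoopA, ih k]

-- ===== VERDICT (by name: the statement is the Claim_ definition above) =====
theorem extract_brand_from_name_py_spec : Claim_equal_extract_brand_from_name_py := by
  intro name _
  unfold Spec_extract_brand_from_name_py
  simp only [extract_brand_from_name_py, extract_brand_from_name_py_alt]
  by_cases hd : PySem.Str.isIn " - " name = true
  · rw [if_pos hd, if_pos hd]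
  · rw [if_neg hd, if_neg hd, pv_brandB_eq]
    by_cases h : pvLoopA [] ((PySem.Str.split₀ name).take 3) = []
    · simp [h]
    · simp [h]
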